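-- pv_equiv track=rewrite | github.com/michael-ta/Varify | src/__init__.py | _insert_delimiter
-- ===== SOURCE A (Python) =====
-- def _insert_delimiter(reference, index, event_id):
--     ''' given the reference and the index position, insert into the reference
--         the '|' delimiter for structural variants
--     '''
--     data = reference.split('_')
--     current_index = 0
--     for x in range(len(data)):
--         if current_index + len(data[x]) > index:
--             data[x] = data[x][:index - current_index] + '|({})|'.format(event_id) + data[x][index-current_index:]
--             break
--         if x % 2 == 0:
--             current_index += len(data[x])
--     return '_'.join(data)
-- ===== SOURCE B (Python) =====
-- def _insert_delimiter(reference, index, event_id):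
--     data = reference.split('_')
--     # pass 1: table of window starts (only even-numbered segments advance the
--     # counter, tracked with a toggling flag instead of an index)
--     starts, s, even = [], 0, True
--     for seg in data:
--         starts.append(s)
--         if even:
--             s += len(seg)
--         even = not even
--     # pass 2: first segment whose window covers the index
--     x = next((i for i, (st, seg) in enumerate(zip(starts, data))
--               if st + len(seg) > index), len(data))
--     if x == len(data):
--         return '_'.join(data)
--     off = index - starts[x]
--     seg = data[x]
--     mid = seg[:off] + '|({})|'.format(event_id) + seg[off:]
--     return '_'.join(data[:x] + [mid] + data[x + 1:])
-- ===== Notes on version B (the rewrite author's own statement) =====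
-- stated objective: alternative
-- what changed: B replaces A's single fused scan (running counter + in-place mutation + break) by two separate passes: it first builds a prefix-start table with a toggling parity flag, then locates the first covering segment in the (starts,data) zip and splices the rejoined list by take/drop surgery.
import Mathlib
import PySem

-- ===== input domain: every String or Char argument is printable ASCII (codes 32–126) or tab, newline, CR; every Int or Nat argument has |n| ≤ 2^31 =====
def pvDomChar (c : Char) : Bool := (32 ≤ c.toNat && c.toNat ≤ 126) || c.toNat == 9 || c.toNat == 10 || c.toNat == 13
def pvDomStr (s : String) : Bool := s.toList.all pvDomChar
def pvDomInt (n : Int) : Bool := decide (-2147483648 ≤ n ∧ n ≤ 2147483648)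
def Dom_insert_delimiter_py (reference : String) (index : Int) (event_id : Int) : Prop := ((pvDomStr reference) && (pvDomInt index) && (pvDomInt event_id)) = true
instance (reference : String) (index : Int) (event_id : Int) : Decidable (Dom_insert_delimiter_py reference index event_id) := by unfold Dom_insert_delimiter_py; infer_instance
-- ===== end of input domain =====

-- B re-implements A's fused scan as two separate passes (prefix-start table, then first-covering-segment lookup and list surgery); same return value, same cost.

-- ===== PORT A =====
-- seg[:off] + '|({})|'.format(eid) + seg[off:]  (shared literal splice of both Pythons)
def pvSplice (seg : List Char) (off : Int) (eid : Int) : List Char :=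
  PySem.List.slice seg none (some off) ++ ("|(".toList ++ (PySem.Int.toStr eid).toList ++ ")|".toList) ++ PySem.List.slice seg (some off) none

-- A's for-loop over range(len(data)) with counter x, running current_index, break on hit
def pvLoopA (index eid : Int) : List (List Char) → Nat → Int → List (List Char)
  | [], _, _ => []
  | seg :: rest, x, cur =>
    if cur + (seg.length : Int) > index then
      pvSplice seg (index - cur) eid :: rest
    else
      seg :: pvLoopA index eid rest (x + 1) (if x % 2 = 0 then cur + (seg.length : Int) else cur)

def insert_delimiter_py (reference : String) (index : Int) (event_id : Int) : String :=
  let data := PySem.Chars.splitOn reference.toList "_".toList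
  String.ofList (PySem.Chars.join "_".toList (pvLoopA index event_id data 0 0))

-- ===== PORT B =====
-- pass 1 of Source B: starts table built by a fold with state (starts, s, even-flag)
def pvStartsB (data : List (List Char)) : List Int :=
  (data.foldl
    (fun (acc : List Int × Int × Bool) seg =>
      (acc.1 ++ [acc.2.1], (if acc.2.2 then acc.2.1 + (seg.length : Int) else acc.2.1), !acc.2.2))
    ([], 0, true)).1

def insert_delimiter_py_alt (reference : String) (index : Int) (event_id : Int) : String :=
  let data := PySem.Chars.splitOn reference.toList "_".toList
  let starts := pvStartsB data
  -- pass 2: first i with starts[i] + len(data[i]) > index (findIdx = len(data) when none)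
  let x := (starts.zip data).findIdx (fun p => decide (p.1 + (p.2.length : Int) > index))
  match (starts.zip data)[x]? with
  | none => String.ofList (PySem.Chars.join "_".toList data)
  | some (st, seg) =>
      String.ofList (PySem.Chars.join "_".toList
        (data.take x ++ [pvSplice seg (index - st) event_id] ++ data.drop (x + 1)))

-- ===== PRECONDITION & SPEC =====
def Spec_insert_delimiter_py (reference : String) (index : Int) (event_id : Int) (out : String) : Prop := out = insert_delimiter_py_alt reference index event_id
instance (reference : String) (index : Int) (event_id : Int) (out : String) : Decidable (Spec_insert_delimiter_py reference index event_id out) := by unfold Spec_insert_delimiter_py; infer_instance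

-- ===== CLAIM (what is proved, stated in full; the proofs are below) =====
def Claim_equal_insert_delimiter_py : Prop := ∀ (reference : String) (index : Int) (event_id : Int), Dom_insert_delimiter_py reference index event_id → Spec_insert_delimiter_py reference index event_id (insert_delimiter_py reference index event_id)

-- ===== LEMMAS AND PROOFS =====

-- simple recursive characterisation of the starts table, with general seed
def pvStartsRec (s : Int) (b : Bool) : List (List Char) → List Int
  | [] => []
  | seg :: rest => s :: pvStartsRec (if b then s + (seg.length : Int) else s) (!b) rest

theorem pvStartsB_fold (data : List (List Char)) :
    ∀ (acc : List Int) (s : Int) (b : Bool),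
      (data.foldl
        (fun (acc : List Int × Int × Bool) seg =>
          (acc.1 ++ [acc.2.1], (if acc.2.2 then acc.2.1 + (seg.length : Int) else acc.2.1), !acc.2.2))
        (acc, s, b)).1 = acc ++ pvStartsRec s b data := by
  induction data with
  | nil => intro acc s b; simp [pvStartsRec]
  | cons seg rest ih =>
      intro acc s b
      simp only [List.foldl_cons, pvStartsRec]
      rw [ih]
      simp

theorem pvStartsB_eq (data : List (List Char)) : pvStartsB data = pvStartsRec 0 true data := by
  unfold pvStartsB
  rw [pvStartsB_fold data [] 0 true]
  simp

-- the list produced by B's pass 2, with general seed (s, b)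
def pvBcore (index eid s : Int) (b : Bool) (data : List (List Char)) : List (List Char) :=
  let starts := pvStartsRec s b data
  let x := (starts.zip data).findIdx (fun p => decide (p.1 + (p.2.length : Int) > index))
  match (starts.zip data)[x]? with
  | none => data
  | some (st, seg) => data.take x ++ [pvSplice seg (index - st) eid] ++ data.drop (x + 1)

theorem pvLoopA_eq_bcore (index eid : Int) (data : List (List Char)) :
    ∀ (x : Nat) (cur : Int),
      pvLoopA index eid data x cur = pvBcore index eid cur (decide (x % 2 = 0)) data := by
  induction data with
  | nil => intro x cur; simp [pvLoopA, pvBcore, pvStartsRec]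
  | cons seg rest ih =>
      intro x cur
      by_cases h : cur + (seg.length : Int) > index
      · simp [pvLoopA, pvBcore, pvStartsRec, h, List.findIdx_cons]
      · have hx : (!decide (x % 2 = 0)) = decide ((x + 1) % 2 = 0) := by
          rcases Nat.mod_two_eq_zero_or_one x with h2 | h2 <;> simp [Nat.add_mod, h2]
        simp only [pvLoopA, h, if_false, pvBcore, pvStartsRec, List.zip_cons_cons,
          List.findIdx_cons, decide_eq_true_eq, hx]
        rw [ih (x + 1)]
        simp only [decide_false, cond_false, List.getElem?_cons_succ, List.take_succ_cons,
          List.drop_succ_cons, pvBcore]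
        cases hm : ((pvStartsRec (if x % 2 = 0 then cur + (seg.length : Int) else cur) (decide ((x + 1) % 2 = 0)) rest).zip rest)[List.findIdx (fun p => decide (p.1 + (p.2.length : Int) > index)) ((pvStartsRec (if x % 2 = 0 then cur + (seg.length : Int) else cur) (decide ((x + 1) % 2 = 0)) rest).zip rest)]? with
        | none => simp
        | some p => cases p with | mk st sg => simp

-- ===== VERDICT (by name: the statement is the Claim_ definition above) =====
theorem insert_delimiter_py_spec : Claim_equal_insert_delimiter_py := by
  intro reference index event_id _
  unfold Spec_insert_delimiter_py insert_delimiter_py insert_delimiter_py_alt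
  simp only [pvStartsB_eq, pvLoopA_eq_bcore, Nat.zero_mod, decide_true, pvBcore]
  cases hm : (((pvStartsRec 0 true (PySem.Chars.splitOn reference.toList "_".toList)).zip (PySem.Chars.splitOn reference.toList "_".toList))[List.findIdx (fun p => decide (p.1 + (p.2.length : Int) > index)) ((pvStartsRec 0 true (PySem.Chars.splitOn reference.toList "_".toList)).zip (PySem.Chars.splitOn reference.toList "_".toList))]?) with
  | none => simp
  | some p => cases p with | mk st sg => simp
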